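-- pv_equiv track=rewrite | github.com/wjdgh9577/ProgrammingStudy | Algorithm/Programmers/2019 Winter Intern/kakao 4.py | solution
-- ===== SOURCE A (Python) =====
-- def solution(k, room_number):
--     answer = []
--
--     dic = {}
--     for i in room_number:
--         p = i
--         visit = [p]
--         while p in dic:
--             visit.append(p)
--             p = dic[p]
--         answer.append(p)
--         dic[p] = p+1
--         for v in visit:
--             dic[v] = p+1
--
--     return answer
-- ===== SOURCE B (Python) =====
-- def solution(k, room_number):
--     taken = set()
--     answer = []
--     for i in room_number:
--         p = i
--         while p in taken:
--             p += 1
--         answer.append(p)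
--         taken.add(p)
--     return answer
-- ===== Notes on version B (the rewrite author's own statement) =====
-- stated objective: simpler
-- what changed: Dropped the pointer dictionary and chain-walk/repointing machinery entirely: B keeps only a set of taken rooms and linearly increments from the requested room to the first free one.
import Mathlib
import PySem

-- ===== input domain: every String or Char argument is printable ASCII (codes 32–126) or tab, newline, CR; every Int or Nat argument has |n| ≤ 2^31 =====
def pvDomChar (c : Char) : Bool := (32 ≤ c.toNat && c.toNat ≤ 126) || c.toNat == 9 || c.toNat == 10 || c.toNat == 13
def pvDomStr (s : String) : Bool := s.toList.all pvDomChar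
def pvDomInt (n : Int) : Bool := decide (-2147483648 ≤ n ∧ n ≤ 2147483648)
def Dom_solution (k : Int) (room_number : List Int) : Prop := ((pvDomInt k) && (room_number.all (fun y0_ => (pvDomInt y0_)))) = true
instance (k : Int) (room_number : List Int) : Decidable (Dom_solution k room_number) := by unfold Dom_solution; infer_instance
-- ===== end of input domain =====

-- B replaces A's next-free pointer dictionary (chain walk + repointing of the visited
-- chain) by a plain set of taken rooms scanned upward one room at a time: simpler, not faster.

-- ===== PORT A =====
-- the 'while p in dic' chain walk; fuel = dic.size + 1 only makes the loop total
-- (proved sufficient below: the chain strictly increases through distinct keys)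
def chaseA (d : PySem.Dict Int Int) : Nat → Int → List Int → Int × List Int
  | 0, p, visit => (p, visit)
  | fuel+1, p, visit =>
    match d.get? p with
    | none => (p, visit)
    | some q => chaseA d fuel q (visit ++ [p])

-- one iteration of A's 'for i in room_number' body
def stepA (st : List Int × PySem.Dict Int Int) (i : Int) : List Int × PySem.Dict Int Int :=
  let r := chaseA st.2 (st.2.size + 1) i [i]
  let p := r.1
  let d1 := st.2.insert p (p + 1)
  let d2 := r.2.foldl (fun d v => d.insert v (p + 1)) d1
  (st.1 ++ [p], d2)

def solution (k : Int) (room_number : List Int) : List Int :=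
  (room_number.foldl stepA ([], PySem.Dict.empty)).1

-- ===== PORT B =====
-- the 'while p in taken: p += 1' scan; fuel = taken.length + 1 only makes the loop total
def scanB (s : PySem.Set Int) : Nat → Int → Int
  | 0, p => p
  | f+1, p => if s.contains p then scanB s f (p + 1) else p

-- one iteration of B's loop body
def stepB (st : List Int × PySem.Set Int) (i : Int) : List Int × PySem.Set Int :=
  let p := scanB st.2 (st.2.length + 1) i
  (st.1 ++ [p], PySem.Set.add st.2 p)

def solution_alt (k : Int) (room_number : List Int) : List Int :=
  (room_number.foldl stepB ([], PySem.Set.empty)).1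

-- ===== PRECONDITION & SPEC =====
def Spec_solution (k : Int) (room_number : List Int) (out : List Int) : Prop := out = solution_alt k room_number
instance (k : Int) (room_number : List Int) (out : List Int) : Decidable (Spec_solution k room_number out) := by unfold Spec_solution; infer_instance

-- ===== CLAIM (what is proved, stated in full; the proofs are below) =====
def Claim_equal_solution : Prop := ∀ (k : Int) (room_number : List Int), Dom_solution k room_number → Spec_solution k room_number (solution k room_number)

-- ===== LEMMAS AND PROOFS =====

-- "r is the first free room ≥ p with respect to the taken-set s"
def FF (s : List Int) (p r : Int) : Prop :=
  p ≤ r ∧ r ∉ s ∧ ∀ y, p ≤ y → y < r → y ∈ s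

-- joint invariant tying A's dictionary to B's set
def InvAB (d : PySem.Dict Int Int) (s : PySem.Set Int) : Prop :=
  s.Nodup ∧ d.keys.Nodup ∧ (∀ x, x ∈ d.keys ↔ x ∈ s) ∧
  (∀ x q, d.get? x = some q → x < q ∧ ∀ y, x ≤ y → y < q → y ∈ s)

lemma FF_card {s : List Int} {p r : Int} (hnd : s.Nodup) (hff : FF s p r) :
    (r - p).toNat ≤ s.length := by
  obtain ⟨hpr, -, hmem⟩ := hff
  have hsub : Finset.Ico p r ⊆ s.toFinset := by
    intro y hy
    rw [Finset.mem_Ico] at hy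
    exact List.mem_toFinset.2 (hmem y hy.1 hy.2)
  have := Finset.card_le_card hsub
  rw [Int.card_Ico, List.toFinset_card_of_nodup hnd] at this
  omega

lemma FF_exists (s : PySem.Set Int) (hnd : s.Nodup) (p : Int) : ∃ r, FF s p r := by
  have hex : ∃ j : Nat, p + (j : Int) ∉ s := by
    by_contra hall
    push Not at hall
    have hsub : Finset.Ico p (p + (s.length : Int) + 1) ⊆ s.toFinset := by
      intro y hy
      rw [Finset.mem_Ico] at hy
      have : y = p + ((y - p).toNat : Int) := by omega
      rw [this]
      exact List.mem_toFinset.2 (hall _)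
    have := Finset.card_le_card hsub
    rw [Int.card_Ico, List.toFinset_card_of_nodup hnd] at this
    omega
  classical
  refine ⟨p + (Nat.find hex : Int), ?_, Nat.find_spec hex, ?_⟩
  · omega
  · intro y hpy hlt
    have hj : p + ((y - p).toNat : Int) ∈ s := by
      by_contra hns
      have : Nat.find hex ≤ (y - p).toNat := Nat.find_le hns
      omega
    have : y = p + ((y - p).toNat : Int) := by omega
    rwa [this]

lemma scanB_eq {s : PySem.Set Int} {p r : Int} (hff : FF s p r) :
    ∀ f : Nat, (r - p).toNat < f → scanB s f p = r := by
  intro f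
  induction f generalizing p with
  | zero => omega
  | succ f ih =>
    intro hf
    obtain ⟨hpr, hrns, hmem⟩ := hff
    simp only [scanB]
    by_cases hp : p ∈ s
    · rw [if_pos (by simpa using hp)]
      have hplt : p < r := by
        rcases lt_or_eq_of_le hpr with h | h
        · exact h
        · exact absurd (h ▸ hp) hrns
      exact ih ⟨by omega, hrns, fun y h1 h2 => hmem y (by omega) h2⟩ (by omega)
    · rw [if_neg (by simpa using hp)]
      rcases lt_or_eq_of_le hpr with h | h
      · exact absurd (hmem p le_rfl h) hp
      · exact h.symm ▸ rfl

lemma chaseA_eq {d : PySem.Dict Int Int} {s : PySem.Set Int} (hinv : InvAB d s)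
    {p r : Int} (hff : FF s p r) :
    ∀ (f : Nat) (vis : List Int), (r - p).toNat < f →
      ∃ t, chaseA d f p vis = (r, vis ++ t) ∧ ∀ v ∈ t, p ≤ v ∧ v ≤ r := by
  obtain ⟨hnd, hkeys, hmemiff, hival⟩ := hinv
  intro f
  induction f generalizing p with
  | zero => omega
  | succ f ih =>
    intro vis hf
    obtain ⟨hpr, hrns, hmem⟩ := hff
    simp only [chaseA]
    cases hget : d.get? p with
    | none =>
      have hpns : p ∉ s := fun hps =>
        ((PySem.Dict.get?_eq_none_iff_not_mem_keys d p).1 hget) ((hmemiff p).2 hps)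
      have : p = r := by
        rcases lt_or_eq_of_le hpr with h | h
        · exact absurd (hmem p le_rfl h) hpns
        · exact h
      exact ⟨[], by simp [this], by simp⟩
    | some q =>
      obtain ⟨hpq, hintv⟩ := hival p q hget
      have hps : p ∈ s := (hmemiff p).1 (PySem.Dict.mem_keys_of_mem_items d
        (PySem.Dict.mem_items_of_get?_eq_some d hget))
      have hplt : p < r := by
        rcases lt_or_eq_of_le hpr with h | h
        · exact h
        · exact absurd (h ▸ hps) hrns
      have hqr : q ≤ r := by
        by_contra hqr
        exact hrns (hintv r hpr (by omega))
      obtain ⟨t, heq, hin⟩ := ih (p := q)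
        ⟨hqr, hrns, fun y h1 h2 => hmem y (by omega) h2⟩ (vis ++ [p]) (by omega)
      refine ⟨p :: t, by simpa using heq, ?_⟩
      intro v hv
      rcases List.mem_cons.1 hv with hv | hv
      · subst hv; exact ⟨le_refl _, by omega⟩
      · exact ⟨by have := hin v hv; omega, (hin v hv).2⟩

lemma get?_foldl_insert_const (vs : List Int) (c : Int) (d : PySem.Dict Int Int) (x : Int) :
    (vs.foldl (fun d v => d.insert v c) d).get? x =
      if x ∈ vs then some c else d.get? x := by
  induction vs generalizing d with
  | nil => simp
  | cons v vs ih =>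
    rw [List.foldl_cons, ih]
    by_cases hx : x ∈ vs
    · rw [if_pos hx, if_pos (List.mem_cons.2 (Or.inr hx))]
    · rw [if_neg hx]
      by_cases hxv : x = v
      · rw [if_pos (List.mem_cons.2 (Or.inl hxv)), hxv, PySem.Dict.get?_insert_self]
      · rw [if_neg (fun h => (List.mem_cons.1 h).elim hxv hx)]
        exact PySem.Dict.get?_insert_of_ne d c hxv

lemma InvAB_step {d : PySem.Dict Int Int} {s : PySem.Set Int} (hinv : InvAB d s)
    {i r : Int} (hff : FF s i r) {vs : List Int} (hvs : ∀ v ∈ vs, i ≤ v ∧ v ≤ r) :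
    InvAB (vs.foldl (fun d v => d.insert v (r + 1)) (d.insert r (r + 1))) (PySem.Set.add s r) := by
  obtain ⟨hnd, hkeys, hmemiff, hival⟩ := hinv
  obtain ⟨hir, hrns, hmem⟩ := hff
  have hbetween : ∀ y, i ≤ y → y < r + 1 → y ∈ PySem.Set.add s r := by
    intro y h1 h2
    rw [PySem.Set.mem_add]
    rcases lt_or_eq_of_le (by omega : y ≤ r) with h | h
    · exact Or.inl (hmem y h1 h)
    · exact Or.inr h
  refine ⟨PySem.Set.nodup_add s r hnd, ?_, ?_, ?_⟩
  · exact PySem.Dict.nodup_keys_foldl_insert vs _ _ (PySem.Dict.nodup_keys_insert d r (r+1) hkeys)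
  · intro x
    rw [PySem.Dict.keys_foldl_insert, PySem.Set.mem_update, PySem.Dict.mem_keys_insert,
      PySem.Set.mem_add]
    constructor
    · rintro ((hx | hx) | hx)
      · exact Or.inr hx
      · exact Or.inl ((hmemiff x).1 hx)
      · obtain ⟨h1, h2⟩ := hvs x hx
        rcases lt_or_eq_of_le h2 with h | h
        · exact Or.inl (hmem x h1 h)
        · exact Or.inr h
    · rintro (hx | hx)
      · exact Or.inl (Or.inr ((hmemiff x).2 hx))
      · exact Or.inl (Or.inl hx)
  · intro x q hq
    rw [get?_foldl_insert_const] at hq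
    by_cases hx : x ∈ vs
    · rw [if_pos hx] at hq
      obtain ⟨h1, h2⟩ := hvs x hx
      cases hq
      exact ⟨by omega, fun y hy1 hy2 => hbetween y (by omega) hy2⟩
    · rw [if_neg hx] at hq
      by_cases hxr : x = r
      · subst hxr
        rw [PySem.Dict.get?_insert_self] at hq
        cases hq
        exact ⟨by omega, fun y hy1 hy2 => hbetween y (by omega) hy2⟩
      · rw [PySem.Dict.get?_insert_of_ne d _ hxr] at hq
        obtain ⟨h1, h2⟩ := hival x q hq
        exact ⟨h1, fun y hy1 hy2 => by
          rw [PySem.Set.mem_add]; exact Or.inl (h2 y hy1 hy2)⟩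

lemma length_keys_eq {d : PySem.Dict Int Int} {s : PySem.Set Int}
    (hkeys : d.keys.Nodup) (hnd : s.Nodup) (hmemiff : ∀ x, x ∈ d.keys ↔ x ∈ s) :
    d.keys.length = s.length :=
  List.Perm.length_eq ((List.perm_ext_iff_of_nodup hkeys hnd).2 hmemiff)

lemma main_loop (l : List Int) :
    ∀ (ans : List Int) (d : PySem.Dict Int Int) (s : PySem.Set Int), InvAB d s →
      (l.foldl stepA (ans, d)).1 = (l.foldl stepB (ans, s)).1 := by
  induction l with
  | nil => intro ans d s _; rfl
  | cons i l ih =>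
    intro ans d s hinv
    obtain ⟨hnd, hkeys, hmemiff, hival⟩ := hinv
    obtain ⟨r, hff⟩ := FF_exists s hnd i
    have hcard : (r - i).toNat ≤ s.length := FF_card hnd hff
    have hsize : d.size = s.length := by
      have := length_keys_eq hkeys hnd hmemiff
      simpa [PySem.Dict.keys] using this
    obtain ⟨t, hch, hin⟩ := chaseA_eq ⟨hnd, hkeys, hmemiff, hival⟩ hff
      (d.size + 1) [i] (by omega)
    have hsc : scanB s (s.length + 1) i = r := scanB_eq hff _ (by omega)
    simp only [List.foldl_cons, stepA, stepB, hch, hsc]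
    apply ih
    exact InvAB_step ⟨hnd, hkeys, hmemiff, hival⟩ hff
      (vs := [i] ++ t) (by
        intro v hv
        rcases List.mem_append.1 hv with hv | hv
        · simp only [List.mem_singleton] at hv
          subst hv; exact ⟨le_refl _, hff.1⟩
        · exact hin v hv)

-- ===== VERDICT (by name: the statement is the Claim_ definition above) =====
theorem solution_spec : Claim_equal_solution := by
  intro k room_number _
  unfold Spec_solution solution solution_alt
  exact main_loop room_number [] _ _ ⟨by simp, by simp [PySem.Dict.keys, PySem.Dict.empty], by simp [PySem.Dict.keys, PySem.Dict.empty], by simp [PySem.Dict.empty, PySem.Dict.get?]⟩
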